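-- pv_equiv track=rewrite | github.com/Clayton-Adamson/Python-projects | euler37/euler37.py | right_chop
-- ===== SOURCE A (Python) =====
-- def right_chop(num):
--
--     chopped_list = []
--     length = len(str(num)) - 1
--
--     for x in range(0,length):
--         chopped_num = num // 10
--         chopped_list.append(int(chopped_num))
--         num = chopped_num
--
--     return chopped_list
-- ===== SOURCE B (Python) =====
-- def right_chop(num):
--     length = len(str(num)) - 1
--     return [int(num // 10 ** i) for i in range(1, length + 1)]
-- ===== Notes on version B (the rewrite author's own statement) =====
-- stated objective: simpler
-- what changed: Replaced A's running-accumulator loop of repeated floor divisions by ten with a comprehension computing each right-truncation independently as a single floor division by the i-th power of ten, using the floor-division composition identity.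
import Mathlib
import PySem

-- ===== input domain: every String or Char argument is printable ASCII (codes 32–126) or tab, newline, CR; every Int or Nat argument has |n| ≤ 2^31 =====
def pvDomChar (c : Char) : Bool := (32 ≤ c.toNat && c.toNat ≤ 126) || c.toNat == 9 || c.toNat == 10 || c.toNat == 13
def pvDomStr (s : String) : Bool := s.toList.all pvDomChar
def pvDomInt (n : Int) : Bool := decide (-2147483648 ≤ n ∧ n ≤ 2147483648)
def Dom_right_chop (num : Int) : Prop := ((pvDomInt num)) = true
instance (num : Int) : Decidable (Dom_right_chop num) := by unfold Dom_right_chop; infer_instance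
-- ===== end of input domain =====

-- B replaces A's running-accumulator loop by computing each right-truncation
-- independently as num // 10**i (same cost; objective: simpler decomposition).

-- ===== PORT A =====
def right_chop (num : Int) : List Int :=
  let length : Int := PySem.Str.len (PySem.Int.toStr num) - 1
  let st := (PySem.List.pyRange 0 length 1).foldl
    (fun (st : List Int × Int) _ =>
      let chopped_num := PySem.Int.floordiv st.2 10
      (st.1 ++ [chopped_num], chopped_num))
    ([], num)
  st.1

-- ===== PORT B =====
def right_chop_alt (num : Int) : List Int :=
  let length : Int := PySem.Str.len (PySem.Int.toStr num) - 1
  (PySem.List.pyRange 1 (length + 1) 1).map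
    (fun i => PySem.Int.floordiv num ((10 : Int) ^ i.toNat))

-- ===== PRECONDITION & SPEC =====
def Spec_right_chop (num : Int) (out : List Int) : Prop := out = right_chop_alt num
instance (num : Int) (out : List Int) : Decidable (Spec_right_chop num out) := by unfold Spec_right_chop; infer_instance

-- ===== CLAIM (what is proved, stated in full; the proofs are below) =====
def Claim_equal_right_chop : Prop := ∀ (num : Int), Dom_right_chop num → Spec_right_chop num (right_chop num)

-- ===== LEMMAS AND PROOFS =====

-- floordiv by 10, iterated, composes into floordiv by a power of ten
theorem floordiv_ten_pow (num : Int) (n : Nat) :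
    PySem.Int.floordiv (PySem.Int.floordiv num ((10 : Int) ^ n)) 10
      = PySem.Int.floordiv num ((10 : Int) ^ (n + 1)) := by
  rw [PySem.Int.floordiv_eq_ediv_of_pos (b := 10) (by norm_num),
      PySem.Int.floordiv_eq_ediv_of_pos (by positivity),
      PySem.Int.floordiv_eq_ediv_of_pos (by positivity)]
  rw [Int.ediv_ediv_of_nonneg (by positivity), pow_succ]

-- invariant of A's loop over range(0, n): after n steps the accumulator holds
-- the first n truncations and the running value is num // 10^n
theorem loop_invariant (num : Int) (n : Nat) :
    (PySem.List.pyRange 0 (n : Int) 1).foldl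
      (fun (st : List Int × Int) _ =>
        let chopped_num := PySem.Int.floordiv st.2 10
        (st.1 ++ [chopped_num], chopped_num))
      ([], num)
    = ((List.range n).map (fun k => PySem.Int.floordiv num ((10 : Int) ^ (k + 1))),
       PySem.Int.floordiv num ((10 : Int) ^ n)) := by
  induction n with
  | zero => simp [PySem.List.pyRange_one_eq_nil]
  | succ m ih =>
    rw [show ((m + 1 : Nat) : Int) = (m : Int) + 1 by push_cast; ring,
        PySem.List.pyRange_one_succ_right (by positivity), List.foldl_append, ih]
    simp only [List.range_succ, List.map_append, List.map_cons, List.map_nil, List.foldl_cons, List.foldl_nil]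
    rw [floordiv_ten_pow]

theorem alt_as_range (num : Int) (n : Nat) :
    (PySem.List.pyRange 1 ((n : Int) + 1) 1).map
      (fun i => PySem.Int.floordiv num ((10 : Int) ^ i.toNat))
    = (List.range n).map (fun k => PySem.Int.floordiv num ((10 : Int) ^ (k + 1))) := by
  rw [PySem.List.pyRange_one]
  have : ((n : Int) + 1 - 1).toNat = n := by omega
  rw [this, List.map_map]
  refine List.map_congr_left ?_
  intro k hk
  simp only [Function.comp_apply]
  rw [show ((1 : Int) + (k : Int)).toNat = k + 1 by omega]

-- ===== VERDICT (by name: the statement is the Claim_ definition above) =====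
theorem right_chop_spec : Claim_equal_right_chop := by
  intro num _
  unfold Spec_right_chop
  simp only [right_chop, right_chop_alt]
  generalize PySem.Str.len (PySem.Int.toStr num) - 1 = L
  by_cases h : 0 ≤ L
  · obtain ⟨n, hn⟩ : ∃ n : Nat, L = (n : Int) := ⟨L.toNat, by omega⟩
    simp only [hn, loop_invariant, alt_as_range]
  · rw [PySem.List.pyRange_one_eq_nil (by omega), PySem.List.pyRange_one_eq_nil (by omega)]
    simp
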